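-- pv_equiv track=rewrite | github.com/NTCColumbia/Ultrastructural-analysis-of-dendritic-spine-head-and-neck- | fnc.py | find_neighbors_old
-- ===== SOURCE A (Python) =====
-- def find_neighbors_old(faces):
--     # finding faces neighbors:
--     nn = []
--     neighbors = []
--     for i in range(len(faces)):
--         for j in range(len(faces)):
--             if len(list(set(faces[i]) & set(faces[j]))) == 2:  # intersection
--                 nn.append(j)
--
--         neighbors.append(nn)
--         nn = []
--     return neighbors
-- ===== SOURCE B (Python) =====
-- def find_neighbors_old(faces):
--     # Inverted index: vertex -> sorted list of faces containing it; then per face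
--     # count shared distinct vertices per candidate and keep counts of exactly 2.
--     n = len(faces)
--     verts = [set(f) for f in faces]
--     vert2faces = {}
--     for i in range(n):
--         for v in verts[i]:
--             vert2faces.setdefault(v, []).append(i)
--     neighbors = []
--     for i in range(n):
--         cnt = {}
--         for v in verts[i]:
--             for j in vert2faces[v]:
--                 cnt[j] = cnt.get(j, 0) + 1
--         neighbors.append(sorted(j for j, c in cnt.items() if c == 2))
--     return neighbors
-- ===== Notes on version B (the rewrite author's own statement) =====
-- stated objective: faster
-- what changed: A tests every pair of faces with a set intersection (all-pairs O(n^2) scans); B builds an inverted vertex-to-faces index once, counts shared distinct vertices per candidate face via that index, and sorts each row, so only faces actually sharing a vertex are ever compared.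
import Mathlib
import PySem

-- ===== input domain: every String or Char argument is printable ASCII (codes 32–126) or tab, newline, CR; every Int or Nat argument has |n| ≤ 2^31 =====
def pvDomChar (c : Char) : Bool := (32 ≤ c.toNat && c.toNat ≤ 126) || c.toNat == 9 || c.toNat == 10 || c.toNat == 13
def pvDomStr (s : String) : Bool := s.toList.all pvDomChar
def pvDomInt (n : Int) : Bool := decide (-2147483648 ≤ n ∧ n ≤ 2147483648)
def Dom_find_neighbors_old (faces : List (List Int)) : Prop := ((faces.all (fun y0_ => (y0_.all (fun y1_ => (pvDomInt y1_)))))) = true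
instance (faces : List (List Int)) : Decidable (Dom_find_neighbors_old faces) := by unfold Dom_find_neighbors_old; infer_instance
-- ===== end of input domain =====

-- B replaces A's all-pairs set-intersection scan by an inverted vertex→faces index
-- with per-face shared-vertex counting (objective: faster, asymptotically fewer pair tests).

-- ===== PORT A =====
def find_neighbors_old (faces : List (List Int)) : List (List Int) :=
  (PySem.List.pyRange 0 (PySem.List.len faces) 1).foldl (fun neighbors i =>
    neighbors ++ [
      (PySem.List.pyRange 0 (PySem.List.len faces) 1).foldl (fun nn j =>
        if (PySem.Set.inter (PySem.Set.ofList (PySem.List.pyGetD faces i []))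
              (PySem.Set.ofList (PySem.List.pyGetD faces j []))).length = 2
        then nn ++ [j] else nn) []]) []

-- ===== PORT B =====
def fnbVerts (faces : List (List Int)) : List (PySem.Set Int) :=
  faces.map (fun f => PySem.Set.ofList f)

def fnbIndex (verts : List (PySem.Set Int)) : PySem.Dict Int (List Int) :=
  (PySem.List.pyRange 0 (PySem.List.len verts) 1).foldl (fun d i =>
    (PySem.List.pyGetD verts i []).foldl (fun d v =>
      d.modify v [] (fun l => l ++ [i])) d) PySem.Dict.empty

def find_neighbors_old_alt (faces : List (List Int)) : List (List Int) :=
  let verts := fnbVerts faces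
  let v2f := fnbIndex verts
  (PySem.List.pyRange 0 (PySem.List.len faces) 1).foldl (fun neighbors i =>
    let cnt := (PySem.List.pyGetD verts i []).foldl (fun c v =>
      (v2f.getD v []).foldl (fun c j => c.modify j 0 (fun x => x + 1)) c) (PySem.Dict.empty : PySem.Dict Int Int)
    neighbors ++ [PySem.List.sorted
      ((cnt.items.filter (fun p => p.2 == 2)).map (fun p => p.1)) (fun j => j) false]) []

-- ===== PRECONDITION & SPEC =====
def Spec_find_neighbors_old (faces : List (List Int)) (out : List (List Int)) : Prop := out = find_neighbors_old_alt faces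
instance (faces : List (List Int)) (out : List (List Int)) : Decidable (Spec_find_neighbors_old faces out) := by unfold Spec_find_neighbors_old; infer_instance

-- ===== CLAIM (what is proved, stated in full; the proofs are below) =====
def Claim_equal_find_neighbors_old : Prop := ∀ (faces : List (List Int)), Dom_find_neighbors_old faces → Spec_find_neighbors_old faces (find_neighbors_old faces)

-- ===== LEMMAS AND PROOFS =====

-- flattening B's nested index-building loop into one loop over (vertex, face) pairs
theorem fnb_nested_modify_append (l : List Int) (h : Int → List Int) (d : PySem.Dict Int (List Int)) :
    l.foldl (fun d i => (h i).foldl (fun d v => d.modify v [] (fun l => l ++ [i])) d) d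
    = (l.flatMap (fun i => (h i).map (fun v => (v, i)))).foldl
        (fun d p => d.modify p.1 [] (fun l => l ++ [p.2])) d := by
  induction l generalizing d with
  | nil => rfl
  | cons x xs ih => simp [List.foldl_append, List.foldl_map, ih]

theorem fnb_flatMap_ite (p : Int → Bool) (l : List Int) :
    l.flatMap (fun x => if p x then [x] else []) = l.filter p := by
  induction l with
  | nil => rfl
  | cons x xs ih => by_cases h : p x <;> simp [h, ih]

-- what B's inverted index holds at each vertex: the ascending list of the faces containing it
theorem fnbIndex_getD (verts : List (PySem.Set Int)) (hnd : ∀ s ∈ verts, s.Nodup) (v : Int) :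
    (fnbIndex verts).getD v []
    = (PySem.List.pyRange 0 verts.length 1).filter
        (fun j => decide (v ∈ PySem.List.pyGetD verts j [])) := by
  unfold fnbIndex
  rw [PySem.List.len_eq, fnb_nested_modify_append, PySem.Dict.getD_foldl_modify_append,
    PySem.Dict.getD_empty, List.nil_append, List.filter_flatMap, List.map_flatMap]
  rw [← fnb_flatMap_ite (fun j => decide (v ∈ PySem.List.pyGetD verts j []))]
  rw [List.flatMap_def, List.flatMap_def]
  congr 1
  apply List.map_congr_left
  intro j hj
  have hj' : 0 ≤ j ∧ j < (verts.length : Int) := PySem.List.mem_pyRange_one.mp hj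
  have hmem : PySem.List.pyGetD verts j [] ∈ verts := by
    apply PySem.List.pyGetD_mem
    constructor <;> omega
  have hnodup : (PySem.List.pyGetD verts j []).Nodup := hnd _ hmem
  rw [List.filter_map, List.map_map]
  have hcomp : ((fun p => p.1 == v) ∘ fun v' => ((v' : Int), j)) = (fun x => x == v) := rfl
  rw [hcomp, List.filter_beq]
  by_cases hv : v ∈ PySem.List.pyGetD verts j []
  · rw [List.count_eq_one_of_mem hnodup hv]; simp [hv]
  · rw [List.count_eq_zero_of_not_mem hv]; simp [hv]

-- flattening B's nested counting loop into one counting loop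
theorem fnb_nested_modify_count (l : List Int) (g : Int → List Int) (c : PySem.Dict Int Int) :
    l.foldl (fun c v => (g v).foldl (fun c j => c.modify j 0 (fun x => x + 1)) c) c
    = (l.flatMap g).foldl (fun c j => c.modify j 0 (fun x => x + 1)) c := by
  induction l generalizing c with
  | nil => rfl
  | cons x xs ih => simp [List.foldl_append, ih]

theorem fnb_count_term (L : List Int) (v j : Int) (verts : List (PySem.Set Int))
    (hg : L = (PySem.List.pyRange 0 verts.length 1).filter (fun j => decide (v ∈ PySem.List.pyGetD verts j []))) :
    L.count j
    = if (0 ≤ j ∧ j < (verts.length : Int)) ∧ v ∈ PySem.List.pyGetD verts j [] then 1 else 0 := by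
  subst hg
  by_cases hv : v ∈ PySem.List.pyGetD verts j []
  · by_cases hr : 0 ≤ j ∧ j < (verts.length : Int)
    · rw [List.count_filter (by simpa using hv)]
      rw [List.count_eq_one_of_mem (PySem.List.nodup_pyRange_one _ _) (PySem.List.mem_pyRange_one.mpr hr)]
      simp [hr, hv]
    · rw [List.count_eq_zero.mpr, if_neg (by tauto)]
      intro hmem
      exact hr (PySem.List.mem_pyRange_one.mp (List.mem_of_mem_filter hmem))
  · rw [List.count_eq_zero.mpr, if_neg (by tauto)]
    intro hmem
    have := List.of_mem_filter hmem
    simp at this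
    exact hv this

theorem fnb_sum_ite (S : List Int) (P Q : Int → Prop) [DecidablePred P] [DecidablePred Q] (c : Prop) [Decidable c]
    (hPQ : ∀ v, P v ↔ c ∧ Q v) :
    (S.map (fun v => if P v then 1 else 0)).sum = if c then S.countP (fun v => decide (Q v)) else 0 := by
  by_cases hc : c
  · rw [if_pos hc, ← PySem.List.sum_map_ite_one_zero_nat]
    congr 1
    apply List.map_congr_left
    intro v _
    by_cases hq : Q v <;> simp [hPQ, hq, hc]
  · rw [if_neg hc]
    have : (S.map (fun v => if P v then 1 else 0)) = S.map (fun _ => 0) := by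
      apply List.map_congr_left; intro v _; simp [hPQ, hc]
    simp [this]

-- how often a candidate face j occurs in B's flattened per-face stream: once per shared vertex
theorem fnb_count_M (verts : List (PySem.Set Int)) (hnd : ∀ s ∈ verts, s.Nodup)
    (S : List Int) (j : Int) :
    (S.flatMap (fun v => (fnbIndex verts).getD v [])).count j
    = if 0 ≤ j ∧ j < (verts.length : Int)
      then S.countP (fun v => decide (v ∈ PySem.List.pyGetD verts j []))
      else 0 := by
  rw [List.count_flatMap]
  have hterm : ∀ v, (List.count j ∘ fun v => (fnbIndex verts).getD v []) v
      = if ((0 ≤ j ∧ j < (verts.length : Int)) ∧ v ∈ PySem.List.pyGetD verts j []) then 1 else 0 := by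
    intro v
    exact fnb_count_term _ v j verts (fnbIndex_getD verts hnd v)
  rw [List.map_congr_left (fun v _ => hterm v)]
  exact fnb_sum_ite S _ _ _ (fun v => Iff.rfl)

-- ===== VERDICT (by name: the statement is the Claim_ definition above) =====
theorem find_neighbors_old_spec : Claim_equal_find_neighbors_old := by
  intro faces _
  unfold Spec_find_neighbors_old find_neighbors_old find_neighbors_old_alt
  simp only [PySem.List.len_eq, PySem.List.foldl_append_singleton_eq_map, List.nil_append]
  apply List.map_congr_left
  intro i hi
  rw [PySem.List.foldl_append_ite_eq_filter]
  rw [fnb_nested_modify_count, ← PySem.Dict.counter_eq_foldl, PySem.Dict.items_counter]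
  rw [List.filter_map, List.map_map]
  rw [List.nil_append]
  have hv : ∀ k : Int, PySem.List.pyGetD (fnbVerts faces) k [] = PySem.Set.ofList (PySem.List.pyGetD faces k []) := by
    intro k
    have h := PySem.List.pyGetD_map (fun f => PySem.Set.ofList f) faces k []
    simpa [fnbVerts] using h
  have hnd : ∀ s ∈ fnbVerts faces, List.Nodup s := by
    intro s hs
    rcases List.mem_map.mp hs with ⟨f, _, rfl⟩
    exact PySem.Set.nodup_ofList f
  have hlen : (fnbVerts faces).length = faces.length := by simp [fnbVerts]
  have hcnt : ∀ j : Int,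
      ((PySem.List.pyGetD (fnbVerts faces) i []).flatMap
        (fun v => (fnbIndex (fnbVerts faces)).getD v [])).count j
      = if 0 ≤ j ∧ j < (faces.length : Int)
        then ((PySem.Set.ofList (PySem.List.pyGetD faces i [])).inter
                (PySem.Set.ofList (PySem.List.pyGetD faces j []))).length
        else 0 := by
    intro j
    rw [fnb_count_M (fnbVerts faces) hnd (PySem.List.pyGetD (fnbVerts faces) i []) j, hlen]
    by_cases hr : 0 ≤ j ∧ j < (faces.length : Int)
    · rw [if_pos hr, if_pos hr]
      simp only [PySem.Set.inter, hv]
      rw [List.countP_eq_length_filter]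
      congr 1
      apply List.filter_congr
      intro v _
      simp [PySem.Set.contains_eq_listContains]
    · rw [if_neg hr, if_neg hr]
  refine (PySem.List.sorted_eq_of_perm_of_pairwise_lt _ _ _ ?_ ?_).symm
  · rw [List.perm_ext_iff_of_nodup
      ((PySem.List.nodup_pyRange_one 0 faces.length).filter _)
      (List.Nodup.map ?_ (List.Nodup.filter _ (PySem.Set.nodup_ofList _)))]
    · intro j
      simp only [List.mem_filter, PySem.List.mem_pyRange_one, List.mem_map, Function.comp_def]
      constructor
      · rintro ⟨⟨h0, h1⟩, hd⟩
        have hd' : ((PySem.Set.ofList (PySem.List.pyGetD faces i [])).inter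
            (PySem.Set.ofList (PySem.List.pyGetD faces j []))).length = 2 := by simpa using hd
        have hc2 : ((PySem.List.pyGetD (fnbVerts faces) i []).flatMap
            (fun v => (fnbIndex (fnbVerts faces)).getD v [])).count j = 2 := by
          rw [hcnt j, if_pos ⟨h0, h1⟩, hd']
        refine ⟨j, ⟨?_, ?_⟩, rfl⟩
        · rw [PySem.Set.mem_ofList, ← List.count_pos_iff, hc2]
          omega
        · simp [hc2]
      · rintro ⟨k, ⟨hk1, hk2⟩, rfl⟩
        have hk2' : ((PySem.List.pyGetD (fnbVerts faces) i []).flatMap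
            (fun v => (fnbIndex (fnbVerts faces)).getD v [])).count k = 2 := by
          have h := hk2
          simp at h
          exact_mod_cast h
        rw [hcnt k] at hk2'
        by_cases hr : 0 ≤ k ∧ k < (faces.length : Int)
        · rw [if_pos hr] at hk2'
          exact ⟨hr, by simpa using hk2'⟩
        · rw [if_neg hr] at hk2'
          omega
    · intro a b hab
      simpa using hab
  · exact List.Pairwise.filter _ (PySem.List.pairwise_lt_pyRange_one 0 faces.length)
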